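-- pv_equiv track=rewrite | github.com/happycoder74/adventofcode | python/y2022/d25/aoc_2022_25.py | encode2
-- ===== SOURCE A (Python) =====
-- import math
--
-- def encode2(num: int) -> str:
--     num_digits: int = math.ceil(math.log(2*num) / math.log(5))
--     lookup = {-2: '=', -1: '-', 0: '0', 1: '1', 2: '2'}
--     snafu_number = []
--     for i in range(num_digits - 1, -1, -1):
--         digit_value = round(num / (5 ** i))
--         num -= digit_value * 5 ** i
--         snafu_number.append(lookup[digit_value])
--     return ''.join(snafu_number)
-- ===== SOURCE B (Python) =====
-- def encode2(num: int) -> str: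
--     lookup = {-2: '=', -1: '-', 0: '0', 1: '1', 2: '2'}
--     digits = []
--     while num:
--         r = num % 5
--         if r <= 2:
--             digits.append(lookup[r])
--             num //= 5
--         else:
--             digits.append(lookup[r - 5])
--             num = num // 5 + 1
--     return ''.join(reversed(digits))
-- ===== Notes on version B (the rewrite author's own statement) =====
-- stated objective: idiomatic
-- what changed: Replaces A's float-based top-down scheme (ceil(log5(2n)) digit count, then round(num/5**i) per position, most-significant first) with the standard least-significant-first balanced base-5 loop using only integer % and //, joining the reversed digit list.
import Mathlib
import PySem

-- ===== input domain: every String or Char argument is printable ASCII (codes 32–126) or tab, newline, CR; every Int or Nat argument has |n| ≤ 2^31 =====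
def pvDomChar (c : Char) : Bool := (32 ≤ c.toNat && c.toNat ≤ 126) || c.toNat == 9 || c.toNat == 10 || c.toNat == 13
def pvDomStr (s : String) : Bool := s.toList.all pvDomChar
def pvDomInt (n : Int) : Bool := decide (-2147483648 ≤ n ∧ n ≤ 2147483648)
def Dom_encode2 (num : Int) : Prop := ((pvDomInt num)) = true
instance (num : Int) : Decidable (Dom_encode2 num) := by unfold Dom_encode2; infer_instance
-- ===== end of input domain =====

-- B replaces A's float-based most-significant-first digit scheme by the standard integer
-- least-significant-first balanced base-5 loop (idiomatic; returns a value where A raises on num ≤ 0).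

-- ===== PORT A =====
-- A's `math.ceil(math.log(2*num) / math.log(5))` uses floats, which are not portable; it is ported
-- as the exact integer ceiling-log recursion ⌈log5 x⌉ (fuel 48 covers every x in Dom); on Dom the
-- float expression computes exactly this value for every num ≥ 1 (2*num never hits a power of 5).
def pvCeilLog5 : Nat → Int → Nat
  | 0, _ => 0
  | f+1, x => if x ≤ 1 then 0 else 1 + pvCeilLog5 f (-(PySem.Int.floordiv (-x) 5))

-- exact integer model of Python's round(num / 5**i) (round-half-even of n/d, d > 0); on Dom the
-- float division and round compute exactly this value.
def pvRoundDiv (n d : Int) : Int :=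
  if 2 * PySem.Int.mod n d < d then PySem.Int.floordiv n d
  else if d < 2 * PySem.Int.mod n d then PySem.Int.floordiv n d + 1
  else if PySem.Int.floordiv n d % 2 = 0 then PySem.Int.floordiv n d
  else PySem.Int.floordiv n d + 1

def pvLookupA : PySem.Dict Int Char :=
  PySem.Dict.ofList [(-2,'='),(-1,'-'),(0,'0'),(1,'1'),(2,'2')]

-- the `for i in range(num_digits-1, -1, -1)` loop, state (num, snafu_number); a missing key in
-- `lookup[digit_value]` would be a KeyError ('?' here), which never happens under Pre_.
def encode2Loop (num : Int) : Nat → List Char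
  | 0 => []
  | i+1 =>
    let dv := pvRoundDiv num (5^i)
    ((PySem.Dict.get? pvLookupA dv).getD '?') :: encode2Loop (num - dv * 5^i) i

def encode2 (num : Int) : String :=
  String.mk (encode2Loop num (pvCeilLog5 48 (2*num)))

-- ===== PORT B =====
def pvLookupB : PySem.Dict Int Char :=
  PySem.Dict.ofList [(-2,'='),(-1,'-'),(0,'0'),(1,'1'),(2,'2')]

-- the `while num:` loop of Source B, appending digit characters least-significant first;
-- the fuel argument (any value > |num|, see encode2_alt) only makes the recursion structural
def altLoop : Nat → Int → List Char
  | 0, _ => []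
  | f+1, num =>
    if num = 0 then []
    else
      let r := PySem.Int.mod num 5
      if r ≤ 2 then
        ((PySem.Dict.get? pvLookupB r).getD '?') :: altLoop f (PySem.Int.floordiv num 5)
      else
        ((PySem.Dict.get? pvLookupB (r - 5)).getD '?') :: altLoop f (PySem.Int.floordiv num 5 + 1)

def encode2_alt (num : Int) : String := String.mk (altLoop (num.natAbs + 1) num).reverse

-- ===== PRECONDITION & SPEC =====
-- Pre_ excludes exactly num ≤ 0, where A raises ValueError (math domain error in math.log(2*num)).
def Pre_encode2 (num : Int) : Prop := 1 ≤ num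
instance (num : Int) : Decidable (Pre_encode2 num) := by unfold Pre_encode2; infer_instance
def pvWitness_encode2 : Int := (3)

def Spec_encode2 (num : Int) (out : String) : Prop := out = encode2_alt num
instance (num : Int) (out : String) : Decidable (Spec_encode2 num out) := by unfold Spec_encode2; infer_instance

-- ===== CLAIM (what is proved, stated in full; the proofs are below) =====
def Claim_equal_encode2 : Prop := ∀ (num : Int), Dom_encode2 num → Pre_encode2 num → Spec_encode2 num (encode2 num)

-- ===== LEMMAS AND PROOFS =====

-- decrease of |num| in each loop step (also why fuel |num|+1 suffices)
theorem pvAltDec1 (num : Int) (h0 : ¬ num = 0) (hc : PySem.Int.mod num 5 ≤ 2) :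
    (PySem.Int.floordiv num 5).natAbs < num.natAbs := by
  have h1 := PySem.Int.floordiv_mul_add_mod num 5
  have h2 := PySem.Int.mod_nonneg num (b := 5) (by norm_num)
  have h3 := PySem.Int.mod_lt num (b := 5) (by norm_num)
  omega

theorem pvAltDec2 (num : Int) (h0 : ¬ num = 0) (hc : ¬ PySem.Int.mod num 5 ≤ 2) :
    (PySem.Int.floordiv num 5 + 1).natAbs < num.natAbs := by
  have h1 := PySem.Int.floordiv_mul_add_mod num 5
  have h2 := PySem.Int.mod_nonneg num (b := 5) (by norm_num)
  have h3 := PySem.Int.mod_lt num (b := 5) (by norm_num)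
  omega

-- digit lists, least-significant first, and their value
def pvVal : List Int → Int
  | [] => 0
  | d :: ds => d + 5 * pvVal ds

def pvCharOf (d : Int) : Char := (PySem.Dict.get? pvLookupB d).getD '?'

-- A's digit values, most-significant first
def pvAD (num : Int) : Nat → List Int
  | 0 => []
  | i+1 => let dv := pvRoundDiv num (5^i); dv :: pvAD (num - dv * 5^i) i

-- B's digit values, least-significant first (same fuelled recursion as altLoop)
def pvBD : Nat → Int → List Int
  | 0, _ => []
  | f+1, num =>
    if num = 0 then []
    else
      let r := PySem.Int.mod num 5
      if r ≤ 2 then r :: pvBD f (PySem.Int.floordiv num 5)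
      else (r - 5) :: pvBD f (PySem.Int.floordiv num 5 + 1)

lemma pow5_pos (i : Nat) : (0:Int) < 5^i := by positivity

lemma pow5_odd (i : Nat) : (5:Int)^i % 2 = 1 := by
  induction i with
  | zero => rfl
  | succ k ih => rw [pow_succ]; omega

lemma pvVal_append (l : List Int) (d : Int) :
    pvVal (l ++ [d]) = pvVal l + d * 5 ^ l.length := by
  induction l with
  | nil => simp [pvVal]
  | cons x t ih => simp [pvVal, ih, List.length_cons]; ring

lemma pvAD_length (num : Int) (i : Nat) : (pvAD num i).length = i := by
  induction i generalizing num with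
  | zero => rfl
  | succ k ih => simp [pvAD, ih]

lemma pvRoundDiv_one (n : Int) : pvRoundDiv n 1 = n := by
  have h1 := PySem.Int.floordiv_mul_add_mod n 1
  have h2 := PySem.Int.mod_nonneg n (b := 1) (by norm_num)
  have h3 := PySem.Int.mod_lt n (b := 1) (by norm_num)
  unfold pvRoundDiv
  split_ifs <;> omega

-- the rounding error: |n - round(n/d)*d| < d/2 for odd d > 0
lemma pvRoundDiv_err (n d : Int) (hd : 0 < d) (ho : d % 2 = 1) :
    -d < 2 * (n - pvRoundDiv n d * d) ∧ 2 * (n - pvRoundDiv n d * d) < d := by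
  have h1 := PySem.Int.floordiv_mul_add_mod n d
  have h2 := PySem.Int.mod_nonneg n hd
  have h3 := PySem.Int.mod_lt n hd
  unfold pvRoundDiv
  have hq1 : (PySem.Int.floordiv n d + 1) * d = PySem.Int.floordiv n d * d + d := by ring
  split_ifs <;> omega

lemma pvRoundDiv_range (n d : Int) (hd : 0 < d) (ho : d % 2 = 1)
    (hlo : -(5*d) < 2*n) (hhi : 2*n < 5*d) :
    -2 ≤ pvRoundDiv n d ∧ pvRoundDiv n d ≤ 2 := by
  obtain ⟨e1, e2⟩ := pvRoundDiv_err n d hd ho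
  set dv := pvRoundDiv n d with hdv
  constructor
  · by_contra h
    have h3 : dv ≤ -3 := by omega
    have : 2 * dv * d ≤ 2 * (-3) * d := by
      apply mul_le_mul_of_nonneg_right _ (le_of_lt hd); omega
    nlinarith
  · by_contra h
    have h3 : 3 ≤ dv := by omega
    have : 2 * 3 * d ≤ 2 * dv * d := by
      apply mul_le_mul_of_nonneg_right _ (le_of_lt hd); omega
    nlinarith

lemma pvRoundDiv_pos (n d : Int) (hd : 0 < d) (ho : d % 2 = 1) (h : d < 2*n) :
    1 ≤ pvRoundDiv n d := by
  obtain ⟨e1, e2⟩ := pvRoundDiv_err n d hd ho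
  nlinarith [pvRoundDiv_err n d hd ho]

lemma pvAD_val (i : Nat) : ∀ num : Int, pvVal ((pvAD num (i+1)).reverse) = num := by
  induction i with
  | zero =>
      intro num
      simp [pvAD, pvVal, pvRoundDiv_one]
  | succ k ih =>
      intro num
      show pvVal ((pvAD num (k+2)).reverse) = num
      rw [pvAD]
      simp only [List.reverse_cons]
      rw [pvVal_append, List.length_reverse, pvAD_length, ih]
      ring

lemma pvAD_range (i : Nat) : ∀ num : Int, -(5^(i+1)) < 2*num → 2*num < 5^(i+1) →
    ∀ d ∈ pvAD num (i+1), -2 ≤ d ∧ d ≤ 2 := by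
  induction i with
  | zero =>
      intro num h1 h2 d hd
      simp [pvAD] at hd
      subst hd
      have := pvRoundDiv_range num (5^0) (pow5_pos 0) (pow5_odd 0) (by push_cast at h1 ⊢; omega) (by push_cast at h2 ⊢; omega)
      simpa using this
  | succ k ih =>
      intro num h1 h2 d hd
      have hpow : (5:Int)^(k+1+1) = 5 * 5^(k+1) := by ring
      have hr := pvRoundDiv_range num (5^(k+1)) (pow5_pos _) (pow5_odd _)
        (by rw [hpow] at h1; omega) (by rw [hpow] at h2; omega)
      rw [pvAD] at hd
      simp only [List.mem_cons] at hd
      rcases hd with rfl | hd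
      · exact hr
      · have herr := pvRoundDiv_err num (5^(k+1)) (pow5_pos _) (pow5_odd _)
        exact ih _ (by omega) (by omega) d hd

lemma pvAD_head (num : Int) (i : Nat) :
    (pvAD num (i+1)).head? = some (pvRoundDiv num (5^i)) := rfl

-- ⌈log5 x⌉ bounds
lemma pvCeilLog5_one (f : Nat) : pvCeilLog5 f 1 = 0 := by
  cases f <;> simp [pvCeilLog5]

lemma pvCeilLog5_bounds (f : Nat) : ∀ x : Int, 2 ≤ x → x ≤ 5^f →
    1 ≤ pvCeilLog5 f x ∧ 5^(pvCeilLog5 f x - 1) < x ∧ x ≤ 5^(pvCeilLog5 f x) := by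
  induction f with
  | zero => intro x h1 h2; norm_num at h2; omega
  | succ k ih =>
      intro x h1 h2
      have hx1 : ¬ x ≤ 1 := by omega
      rw [pvCeilLog5, if_neg hx1]
      set x' := -(PySem.Int.floordiv (-x) 5) with hx'
      have hceil : (x' - 1) * 5 < x ∧ x ≤ x' * 5 := by
        have := (PySem.Int.neg_floordiv_neg_eq_iff_of_pos (a := x) (b := 5) (q := x') (by norm_num)).mp rfl
        exact this
      have hx'1 : 1 ≤ x' := by nlinarith [hceil.2]
      have hx'le : x' ≤ 5^k := by
        have h5 : (x' - 1) * 5 < 5^k * 5 := by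
          calc (x' - 1) * 5 < x := hceil.1
          _ ≤ 5^(k+1) := h2
          _ = 5^k * 5 := by ring
        have := lt_of_mul_lt_mul_right h5 (by norm_num : (0:Int) ≤ 5)
        omega
      by_cases hx'2 : x' = 1
      · rw [hx'2, pvCeilLog5_one]
        refine ⟨by omega, ?_, ?_⟩
        · norm_num; omega
        · norm_num; nlinarith [hceil.2]
      · obtain ⟨hL1, hLlo, hLhi⟩ := ih x' (by omega) hx'le
        set L' := pvCeilLog5 k x' with hL'
        refine ⟨by omega, ?_, ?_⟩
        · have : 1 + L' - 1 = L' := by omega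
          rw [this]
          have hstep : (5:Int)^L' = 5^(L'-1) * 5 := by
            rw [← pow_succ]; congr 1; omega
          rw [hstep]
          nlinarith [hLlo, hceil.1]
        · have hstep : (5:Int)^(1 + L') = 5 * 5^L' := by rw [pow_add]; ring
          rw [hstep]
          nlinarith [hLhi, hceil.2]

-- B: value, digit range, no leading zero, and the char/digit relation, by strong induction on |num|
lemma pvBD_zero (f : Nat) : pvBD f 0 = [] := by cases f <;> simp [pvBD]

lemma pvBD_ne_nil (f : Nat) (num : Int) (h0 : num ≠ 0) (hf : num.natAbs < f) : pvBD f num ≠ [] := by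
  cases f with
  | zero => omega
  | succ k =>
      rw [pvBD]
      rw [if_neg h0]
      dsimp only
      split <;> simp

lemma pvB_main : ∀ (f : Nat) (num : Int), num.natAbs < f →
    (altLoop f num = (pvBD f num).map pvCharOf ∧ pvVal (pvBD f num) = num ∧
     (∀ d ∈ pvBD f num, -2 ≤ d ∧ d ≤ 2) ∧ (num ≠ 0 → (pvBD f num).getLast? ≠ some 0)) := by
  intro f
  induction f with
  | zero => intro num h; omega
  | succ k ih =>
      intro num h
      by_cases h0 : num = 0
      · subst h0; simp [altLoop, pvBD, pvVal]
      · have h1 := PySem.Int.floordiv_mul_add_mod num 5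
        have h2 := PySem.Int.mod_nonneg num (b := 5) (by norm_num)
        have h3 := PySem.Int.mod_lt num (b := 5) (by norm_num)
        have hd1 := fun hc => pvAltDec1 num h0 hc
        have hd2 := fun hc => pvAltDec2 num h0 hc
        rw [pvBD, altLoop]
        rw [if_neg h0, if_neg h0]
        obtain ⟨q, r, hq, hrr⟩ : ∃ q r, PySem.Int.floordiv num 5 = q ∧ PySem.Int.mod num 5 = r :=
          ⟨_, _, rfl, rfl⟩
        rw [hq] at h1 hd1 hd2 ⊢
        rw [hrr] at h1 h2 h3 hd1 hd2 ⊢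
        by_cases hc : r ≤ 2
        · obtain ⟨ihm, ihv, ihr, ihz⟩ := ih q (by have := hd1 hc; omega)
          rw [if_pos hc, if_pos hc]
          refine ⟨by simp [ihm, pvCharOf], by simp [pvVal, ihv]; omega, ?_, ?_⟩
          · intro d hd
            simp only [List.mem_cons] at hd
            rcases hd with rfl | hd
            · omega
            · exact ihr d hd
          · intro _
            by_cases hq0 : q = 0
            · rw [hq0, pvBD_zero]
              intro hcon
              simp at hcon
              exact h0 (by omega)
            · have hne : pvBD k q ≠ [] := pvBD_ne_nil k q hq0 (by have := hd1 hc; omega)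
              obtain ⟨x, t, hxt⟩ := List.exists_cons_of_ne_nil hne
              rw [hxt, List.getLast?_cons_cons, ← hxt]
              exact ihz hq0
        · obtain ⟨ihm, ihv, ihr, ihz⟩ := ih (q + 1) (by have := hd2 hc; omega)
          rw [if_neg hc, if_neg hc]
          refine ⟨by simp [ihm, pvCharOf], by simp [pvVal, ihv]; omega, ?_, ?_⟩
          · intro d hd
            simp only [List.mem_cons] at hd
            rcases hd with rfl | hd
            · omega
            · exact ihr d hd
          · intro _
            by_cases hq0 : q + 1 = 0
            · rw [hq0, pvBD_zero]
              intro hcon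
              simp at hcon
              omega
            · have hne : pvBD k (q+1) ≠ [] := pvBD_ne_nil k (q+1) hq0 (by have := hd2 hc; omega)
              obtain ⟨x, t, hxt⟩ := List.exists_cons_of_ne_nil hne
              rw [hxt, List.getLast?_cons_cons, ← hxt]
              exact ihz hq0

-- uniqueness of the balanced base-5 representation (least-significant first, no trailing zero)
lemma pvVal_zero_nil : ∀ ds : List Int, (∀ d ∈ ds, -2 ≤ d ∧ d ≤ 2) →
    ds.getLast? ≠ some 0 → pvVal ds = 0 → ds = [] := by
  intro ds
  induction ds with
  | nil => intro _ _ _; rfl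
  | cons d t ih =>
      intro hr hz hv
      simp only [pvVal] at hv
      have hd := hr d (by simp)
      have hd0 : d = 0 ∧ pvVal t = 0 := by omega
      cases t with
      | nil =>
          exfalso; apply hz
          simp [hd0.1]
      | cons x t' =>
          exfalso
          rw [List.getLast?_cons_cons] at hz
          have := ih (fun e he => hr e (by simp [he])) hz hd0.2
          simp at this

lemma pvVal_uniq : ∀ ds1 ds2 : List Int,
    (∀ d ∈ ds1, -2 ≤ d ∧ d ≤ 2) → (∀ d ∈ ds2, -2 ≤ d ∧ d ≤ 2) →
    ds1.getLast? ≠ some 0 → ds2.getLast? ≠ some 0 →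
    pvVal ds1 = pvVal ds2 → ds1 = ds2 := by
  intro ds1
  induction ds1 with
  | nil =>
      intro ds2 _ hr2 _ hz2 hv
      exact (pvVal_zero_nil ds2 hr2 hz2 (by simp [pvVal] at hv ⊢; omega)).symm
  | cons d t1 ih =>
      intro ds2 hr1 hr2 hz1 hz2 hv
      cases ds2 with
      | nil =>
          exact absurd (pvVal_zero_nil (d :: t1) hr1 hz1 (by simp [pvVal] at hv ⊢; omega)) (by simp)
      | cons e t2 =>
          simp only [pvVal] at hv
          have hd := hr1 d (by simp)
          have he := hr2 e (by simp)
          have hde : d = e ∧ pvVal t1 = pvVal t2 := by omega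
          have ht : t1 = t2 := by
            cases ht1 : t1 with
            | nil =>
                cases ht2 : t2 with
                | nil => rfl
                | cons y t2' =>
                    exfalso
                    rw [ht2, List.getLast?_cons_cons] at hz2
                    have : pvVal t2 = 0 := by rw [← hde.2, ht1]; rfl
                    have := pvVal_zero_nil t2 (fun e he => hr2 e (by simp [he]))
                      (by rw [ht2]; exact hz2) this
                    rw [ht2] at this; simp at this
            | cons y t1' =>
                cases ht2 : t2 with
                | nil =>
                    exfalso
                    rw [ht1, List.getLast?_cons_cons] at hz1
                    have : pvVal t1 = 0 := by rw [hde.2, ht2]; rfl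
                    have := pvVal_zero_nil t1 (fun e he => hr1 e (by simp [he]))
                      (by rw [ht1]; exact hz1) this
                    rw [ht1] at this; simp at this
                | cons z t2' =>
                    rw [← ht1, ← ht2]
                    apply ih t2 (fun e he => hr1 e (by simp [he])) (fun e he => hr2 e (by simp [he]))
                    · rw [ht1, List.getLast?_cons_cons] at hz1; rw [ht1]; exact hz1
                    · rw [ht2, List.getLast?_cons_cons] at hz2; rw [ht2]; exact hz2
                    · exact hde.2
          rw [hde.1, ht]

lemma encode2Loop_eq_map (i : Nat) : ∀ num : Int,
    encode2Loop num i = (pvAD num i).map pvCharOf := by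
  induction i with
  | zero => intro num; rfl
  | succ k ih =>
      intro num
      rw [encode2Loop, pvAD, List.map_cons, ih]
      rfl

-- ===== VERDICT (by name: the statement is the Claim_ definition above) =====
theorem encode2_spec : Claim_equal_encode2 := by
  intro num hdom hpre
  unfold Pre_encode2 at hpre
  unfold Dom_encode2 pvDomInt at hdom
  simp only [decide_eq_true_eq] at hdom
  unfold Spec_encode2
  -- digit count and its bounds
  have hx2 : (2:Int) ≤ 2 * num := by omega
  have hx48 : 2 * num ≤ 5^48 := by nlinarith [hdom.2]
  obtain ⟨hL1, hLlo, hLhi⟩ := pvCeilLog5_bounds 48 (2*num) hx2 hx48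
  unfold encode2 encode2_alt
  generalize hLg : pvCeilLog5 48 (2*num) = L at hL1 hLlo hLhi ⊢
  obtain ⟨i, rfl⟩ : ∃ i, L = i + 1 := ⟨L - 1, by omega⟩
  have hLstrict : 2 * num < 5^(i+1) := by
    rcases lt_or_eq_of_le hLhi with h | h
    · exact h
    · exfalso; have := pow5_odd (i+1); omega
  have hlow : (5:Int)^i < 2 * num := by
    have : i + 1 - 1 = i := by omega
    rw [this] at hLlo; exact hLlo
  -- A's digit list (reversed, least-significant first)
  have hAval := pvAD_val i num
  have hArange := pvAD_range i num (by have := pow5_pos (i+1); omega) hLstrict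
  have hAhead : ((pvAD num (i+1)).reverse).getLast? = some (pvRoundDiv num (5^i)) := by
    rw [List.getLast?_reverse, pvAD_head]
  have hApos : 1 ≤ pvRoundDiv num (5^i) := pvRoundDiv_pos num (5^i) (pow5_pos i) (pow5_odd i) hlow
  -- B's digit list
  obtain ⟨hBm, hBv, hBr, hBz⟩ := pvB_main (num.natAbs + 1) num (by omega)
  -- uniqueness
  have hmain : (pvAD num (i+1)).reverse = pvBD (num.natAbs + 1) num := by
    apply pvVal_uniq
    · intro d hd; exact hArange d (List.mem_reverse.mp hd)
    · exact hBr
    · rw [hAhead]; intro hcon; simp at hcon; omega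
    · exact hBz (by omega)
    · rw [hAval, hBv]
  have hAD : pvAD num (i+1) = (pvBD (num.natAbs + 1) num).reverse := by
    rw [← hmain, List.reverse_reverse]
  rw [encode2Loop_eq_map, hAD, hBm, ← List.map_reverse]
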